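-- pv_equiv track=rewrite | github.com/Cojocaru-Mihai/Divined-Cookbook | Main.py | find_recipe_info
-- ===== SOURCE A (Python) =====
-- def find_recipe_info(recipe, data):
--     recipe_diff, recipe_time = None, None
--     for diff, recipes in data.get("difficulty", {}).items():
--         if recipe in recipes:
--             recipe_diff = diff
--             break
--     for t, recipes in data.get("time", {}).items():
--         if recipe in recipes:
--             recipe_time = t
--             break
--     return recipe_diff, recipe_time
-- ===== SOURCE B (Python) =====
-- def find_recipe_info(recipe, data):
--     def index(cat):
--         idx = {}
--         for key, recipes in cat.items():
--             for r in recipes: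
--                 idx.setdefault(r, key)
--         return idx
--     diff_idx = index(data.get("difficulty", {}))
--     time_idx = index(data.get("time", {}))
--     return diff_idx.get(recipe), time_idx.get(recipe)
-- ===== Notes on version B (the rewrite author's own statement) =====
-- stated objective: alternative
-- what changed: Replaces the two linear scans with break-on-first-match by building, per category, a reverse index recipe-name -> key via dict.setdefault (first occurrence wins), then answering with a single dict lookup.
import Mathlib
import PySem

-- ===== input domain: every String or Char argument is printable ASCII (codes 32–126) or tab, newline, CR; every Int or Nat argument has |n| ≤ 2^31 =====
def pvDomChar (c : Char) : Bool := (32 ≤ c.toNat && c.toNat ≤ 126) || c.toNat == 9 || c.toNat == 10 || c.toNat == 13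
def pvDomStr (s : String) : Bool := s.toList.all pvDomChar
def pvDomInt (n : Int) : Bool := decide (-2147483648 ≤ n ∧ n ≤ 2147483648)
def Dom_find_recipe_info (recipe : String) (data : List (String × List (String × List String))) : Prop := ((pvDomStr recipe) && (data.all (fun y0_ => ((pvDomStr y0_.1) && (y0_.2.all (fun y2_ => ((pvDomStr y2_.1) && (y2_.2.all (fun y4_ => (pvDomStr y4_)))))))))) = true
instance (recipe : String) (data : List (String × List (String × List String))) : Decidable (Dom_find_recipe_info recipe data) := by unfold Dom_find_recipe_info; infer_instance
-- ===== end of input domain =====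

-- B builds a reverse index (recipe -> key) per category and answers with one lookup; alternative structure, same cost.

-- ===== PORT A =====
-- data.get(name, {}) on the outer dict
def pvGetCat (data : List (String × List (String × List String))) (name : String) :
    List (String × List String) :=
  (PySem.Dict.mk data).getD name []

-- the for-loop with break: first key whose recipe list contains `recipe`
def pvLoopA (recipe : String) : List (String × List String) → Option String
  | [] => none
  | (k, rs) :: rest => if rs.contains recipe then some k else pvLoopA recipe rest

def find_recipe_info (recipe : String) (data : List (String × List (String × List String))) : Option String × Option String :=
  (pvLoopA recipe (pvGetCat data "difficulty"), pvLoopA recipe (pvGetCat data "time"))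

-- ===== PORT B =====
-- index(cat): idx = {}; for key, recipes in cat.items(): for r in recipes: idx.setdefault(r, key)
def pvIndex (cat : List (String × List String)) : PySem.Dict String String :=
  cat.foldl (fun idx p => p.2.foldl (fun idx r => idx.setdefault r p.1) idx) PySem.Dict.empty

def find_recipe_info_alt (recipe : String) (data : List (String × List (String × List String))) : Option String × Option String :=
  let diffIdx := pvIndex (pvGetCat data "difficulty")
  let timeIdx := pvIndex (pvGetCat data "time")
  (diffIdx.get? recipe, timeIdx.get? recipe)

-- ===== PRECONDITION & SPEC =====
def Spec_find_recipe_info (recipe : String) (data : List (String × List (String × List String))) (out : Option String × Option String) : Prop := out = find_recipe_info_alt recipe data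
instance (recipe : String) (data : List (String × List (String × List String))) (out : Option String × Option String) : Decidable (Spec_find_recipe_info recipe data out) := by unfold Spec_find_recipe_info; infer_instance

-- ===== CLAIM (what is proved, stated in full; the proofs are below) =====
def Claim_equal_find_recipe_info : Prop := ∀ (recipe : String) (data : List (String × List (String × List String))), Dom_find_recipe_info recipe data → Spec_find_recipe_info recipe data (find_recipe_info recipe data)

-- ===== LEMMAS AND PROOFS =====

-- lookup after the inner setdefault loop: the key is recorded iff the recipe occurs and was not indexed yet
theorem get?_inner_fold (recipe k : String) (rs : List String) (idx : PySem.Dict String String) :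
    (rs.foldl (fun idx r => idx.setdefault r k) idx).get? recipe
      = if rs.contains recipe && !(idx.contains recipe) then some k else idx.get? recipe := by
  induction rs generalizing idx with
  | nil => simp
  | cons r rs ih =>
    simp only [List.foldl_cons, ih]
    by_cases hc : idx.contains r = true
    · rw [PySem.Dict.setdefault_of_contains idx k hc]
      by_cases hr : recipe = r
      · subst hr; simp [hc]
      · simp [hr]
    · rw [PySem.Dict.setdefault_of_not_contains idx k (by simpa using hc)]
      by_cases hr : recipe = r
      · subst hr
        simp [hc]
      · simp [PySem.Dict.contains_insert, PySem.Dict.get?_insert, hr]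

-- lookup in the index built from `cat` on top of `idx` = old answer, else A's first-match scan
theorem get?_index_fold (recipe : String) (cat : List (String × List String))
    (idx : PySem.Dict String String) :
    (cat.foldl (fun idx p => p.2.foldl (fun idx r => idx.setdefault r p.1) idx) idx).get? recipe
      = ((idx.get? recipe).or (pvLoopA recipe cat)) := by
  induction cat generalizing idx with
  | nil => simp [pvLoopA]
  | cons p rest ih =>
    rcases p with ⟨k, rs⟩
    simp only [List.foldl_cons, ih, get?_inner_fold]
    cases h : idx.get? recipe with
    | some v =>
      have hc : idx.contains recipe = true := by
        rw [PySem.Dict.contains_eq_isSome_get?, h]; rfl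
      simp [hc, pvLoopA]
    | none =>
      have hc : idx.contains recipe = false := by
        rw [PySem.Dict.contains_eq_isSome_get?, h]; rfl
      by_cases hm : recipe ∈ rs
      · simp [hc, hm, pvLoopA]
      · simp [hc, hm, pvLoopA]

theorem get?_pvIndex (recipe : String) (cat : List (String × List String)) :
    (pvIndex cat).get? recipe = pvLoopA recipe cat := by
  simp [pvIndex, get?_index_fold]

-- ===== VERDICT (by name: the statement is the Claim_ definition above) =====
theorem find_recipe_info_spec : Claim_equal_find_recipe_info := by
  intro recipe data _
  unfold Spec_find_recipe_info find_recipe_info find_recipe_info_alt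
  simp [get?_pvIndex]
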